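-- pv_equiv track=rewrite | github.com/mikewolfli/IE_MBom | src/TabPanes.py | boxid_convert
-- ===== SOURCE A (Python) =====
-- def boxid_convert(s):
--     i_pos = s.find('#')
--     if i_pos == -1 or s.isdecimal() or len(s)==0:
--         return s
--
--     e=''
--     b=False
--     e1=''
--     for i in range(len(s)):
--         if s[i].isdecimal():
--             if len(e)<2:
--                 e=e+s[i]
--             else:
--                 e1=e1+s[i]
--         else:
--             if len(e)>0 and len(e)<2:
--                 e='0'+e
--             if len(e1)>0:
--                 break
--
--     if len(e)==1:
--         e='0'+e
--
--     for j in range(3-len(e1)):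
--         e1='0'+e1
--
--     return e+e1
-- ===== SOURCE B (Python) =====
-- def boxid_convert(s):
--     if s.find('#') == -1 or s.isdecimal() or len(s) == 0:
--         return s
--     # collect maximal runs of decimal digits
--     runs = []
--     i = 0
--     n = len(s)
--     while i < n:
--         if s[i].isdecimal():
--             j = i
--             while j < n and s[j].isdecimal():
--                 j += 1
--             runs.append(s[i:j])
--             i = j
--         else:
--             i += 1
--     if not runs:
--         e, e1 = '', ''
--     elif len(runs[0]) >= 3:
--         e, e1 = runs[0][:2], runs[0][2:]
--     else:
--         e = runs[0].rjust(2, '0')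
--         e1 = runs[1] if len(runs) > 1 else ''
--     return e + e1.rjust(3, '0')
-- ===== Notes on version B (the rewrite author's own statement) =====
-- stated objective: simpler
-- what changed: Replaces A's char-by-char state machine (two accumulators, a pad-inside-the-loop and a break) by extracting the maximal digit runs once and then computing the result from the first one or two runs with slicing and padding.
import Mathlib
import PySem

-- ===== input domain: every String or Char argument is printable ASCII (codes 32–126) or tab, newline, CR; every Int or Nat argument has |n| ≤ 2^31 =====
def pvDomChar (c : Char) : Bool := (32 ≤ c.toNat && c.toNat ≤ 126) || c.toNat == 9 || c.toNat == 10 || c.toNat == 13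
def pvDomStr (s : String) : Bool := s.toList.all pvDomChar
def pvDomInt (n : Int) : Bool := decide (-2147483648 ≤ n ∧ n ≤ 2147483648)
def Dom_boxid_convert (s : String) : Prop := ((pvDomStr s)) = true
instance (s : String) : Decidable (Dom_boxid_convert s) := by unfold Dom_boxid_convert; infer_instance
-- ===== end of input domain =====

-- B replaces A's char-by-char state machine by extracting the maximal digit runs once and
-- computing the result from the first one or two runs (objective: simpler).
-- isdecimal is ported as PySem isdigit, exact on this ASCII domain.

-- ===== PORT A =====
-- the for-loop over range(len(s)) with its break, on state (e, e1)
def boxidLoopA : List Char → List Char → List Char → (List Char × List Char)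
  | [], e, e1 => (e, e1)
  | c :: rest, e, e1 =>
    if PySem.Chars.isdigit c then
      if e.length < 2 then boxidLoopA rest (e ++ [c]) e1
      else boxidLoopA rest e (e1 ++ [c])
    else
      let e' := if 0 < e.length ∧ e.length < 2 then '0' :: e else e
      if 0 < e1.length then (e', e1) else boxidLoopA rest e' e1

def boxid_convert (s : String) : String :=
  if PySem.Str.find s "#" = -1 ∨ PySem.Str.strIsdigit s = true ∨ PySem.Str.len s = 0 then s
  else
    let p := boxidLoopA s.toList [] []
    let e := if p.1.length = 1 then '0' :: p.1 else p.1
    -- for j in range(3 - len(e1)): e1 = '0' + e1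
    let e1 := List.replicate (3 - p.2.length) '0' ++ p.2
    String.ofList (e ++ e1)

-- ===== PORT B =====
-- maximal runs of decimal digits of the string (B's inner while-scan = takeWhile/dropWhile)
def digitRuns : List Char → List (List Char)
  | [] => []
  | c :: rest =>
    if PySem.Chars.isdigit c then
      (c :: rest.takeWhile PySem.Chars.isdigit) :: digitRuns (rest.dropWhile PySem.Chars.isdigit)
    else digitRuns rest
termination_by l => l.length
decreasing_by
  · exact Nat.lt_succ_of_le (List.length_dropWhile_le _ _)
  · exact Nat.lt_succ_of_le (Nat.le_refl _)

-- e and e1 from the run list; rjust(w, '0') is ported as replicate-prepend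
def boxidPairB (runs : List (List Char)) : List Char × List Char :=
  match runs with
  | [] => ([], [])
  | r1 :: rest =>
    if 3 ≤ r1.length then (r1.take 2, r1.drop 2)
    else (List.replicate (2 - r1.length) '0' ++ r1, rest.headD [])

def boxid_convert_alt (s : String) : String :=
  if PySem.Str.find s "#" = -1 ∨ PySem.Str.strIsdigit s = true ∨ PySem.Str.len s = 0 then s
  else
    let p := boxidPairB (digitRuns s.toList)
    String.ofList (p.1 ++ (List.replicate (3 - p.2.length) '0' ++ p.2))

-- ===== PRECONDITION & SPEC =====
def Spec_boxid_convert (s : String) (out : String) : Prop := out = boxid_convert_alt s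
instance (s : String) (out : String) : Decidable (Spec_boxid_convert s out) := by unfold Spec_boxid_convert; infer_instance

-- ===== CLAIM (what is proved, stated in full; the proofs are below) =====
def Claim_equal_boxid_convert : Prop := ∀ (s : String), Dom_boxid_convert s → Spec_boxid_convert s (boxid_convert s)

-- ===== LEMMAS AND PROOFS =====

-- state: e full (length 2), e1 nonempty — digits append to e1 until a non-digit breaks
theorem loopA_full_run (l e e1 : List Char) (he : e.length = 2) (h1 : e1 ≠ []) :
    boxidLoopA l e e1 = (e, e1 ++ l.takeWhile PySem.Chars.isdigit) := by
  induction l generalizing e1 with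
  | nil => simp [boxidLoopA]
  | cons c rest ih =>
    by_cases hc : PySem.Chars.isdigit c = true
    · simp [boxidLoopA, hc, he, ih (e1 ++ [c]) (by simp), List.append_assoc]
    · have h0 : 0 < e1.length := List.length_pos_of_ne_nil h1
      simp [boxidLoopA, Bool.eq_false_iff.mpr hc, he, h0]

-- state: e full (length 2), e1 empty — the result's e1 is the first digit run of the remainder
theorem loopA_full_empty (l e : List Char) (he : e.length = 2) :
    boxidLoopA l e [] = (e, (digitRuns l).headD []) := by
  induction l with
  | nil => simp [boxidLoopA, digitRuns]
  | cons c rest ih =>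
    by_cases hc : PySem.Chars.isdigit c = true
    · simp [boxidLoopA, hc, he, digitRuns, loopA_full_run rest e [c] he (by simp)]
    · simp [boxidLoopA, Bool.eq_false_iff.mpr hc, he, digitRuns, ih]

-- the main loop characterisation, including A's post-loop padding of e
theorem loopA_start (l : List Char) :
    ((if (boxidLoopA l [] []).1.length = 1 then '0' :: (boxidLoopA l [] []).1
        else (boxidLoopA l [] []).1), (boxidLoopA l [] []).2) =
      boxidPairB (digitRuns l) := by
  induction l with
  | nil => simp [boxidLoopA, digitRuns, boxidPairB]
  | cons c rest ih =>
    by_cases hc : PySem.Chars.isdigit c = true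
    · -- c starts the first run
      rw [show boxidLoopA (c :: rest) [] [] = boxidLoopA rest [c] [] by
        simp [boxidLoopA, hc]]
      cases rest with
      | nil => simp [boxidLoopA, digitRuns, hc, boxidPairB]
      | cons c2 rest2 =>
        by_cases hc2 : PySem.Chars.isdigit c2 = true
        · -- second digit: e = [c, c2] is full
          rw [show boxidLoopA (c2 :: rest2) [c] [] = boxidLoopA rest2 [c, c2] [] by
            simp [boxidLoopA, hc2]]
          rw [loopA_full_empty rest2 [c, c2] rfl]
          cases rest2 with
          | nil => simp [digitRuns, hc, hc2, boxidPairB]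
          | cons c3 rest3 =>
            by_cases hc3 : PySem.Chars.isdigit c3 = true
            · simp [digitRuns, hc, hc2, hc3, boxidPairB]
            · simp [digitRuns, hc, hc2, Bool.eq_false_iff.mpr hc3, boxidPairB]
        · -- the first run is exactly [c]
          rw [show boxidLoopA (c2 :: rest2) [c] [] = boxidLoopA rest2 ['0', c] [] by
            simp [boxidLoopA, Bool.eq_false_iff.mpr hc2]]
          rw [loopA_full_empty rest2 ['0', c] rfl]
          simp [digitRuns, hc, Bool.eq_false_iff.mpr hc2, boxidPairB]
    · -- leading non-digit with empty state: skipped by both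
      rw [show boxidLoopA (c :: rest) [] [] = boxidLoopA rest [] [] by
        simp [boxidLoopA, Bool.eq_false_iff.mpr hc]]
      rw [show digitRuns (c :: rest) = digitRuns rest by
        simp [digitRuns, Bool.eq_false_iff.mpr hc]]
      exact ih

-- ===== VERDICT (by name: the statement is the Claim_ definition above) =====
theorem boxid_convert_spec : Claim_equal_boxid_convert := by
  intro s _
  unfold Spec_boxid_convert boxid_convert boxid_convert_alt
  split_ifs with hg
  · rfl
  · have h := loopA_start s.toList
    rw [Prod.ext_iff] at h
    obtain ⟨h1, h2⟩ := h
    dsimp only at h1 h2 ⊢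
    rw [h1, h2]
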